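-- pv_equiv track=rewrite | github.com/Mcclujdd/othello | othello/game/board.py | create_tkr_coordinates
-- ===== SOURCE A (Python) =====
-- def create_tkr_coordinates(coordinates): # coordinates must be [x1, y1, x2, y2] format
--
--     y1 = coordinates[1]
--     y2 = coordinates[3]
--     tkr_values = []
--
--     for row in range(8):
--         x1 = coordinates[0]
--         x2 = coordinates[2]
--         for col in range(8):
--             tkr_values.append([x1, y1, x2, y2])
--             x1 += 90
--             x2 += 90
--         y1 += 90
--         y2 += 90
--     return tkr_values
-- ===== SOURCE B (Python) =====
-- def create_tkr_coordinates(coordinates): # coordinates must be [x1, y1, x2, y2] format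
--     # Build the first row by translating the last box 90px right, then build the
--     # grid by translating whole rows 90px down: no per-cell accumulators.
--     row = [[coordinates[0], coordinates[1], coordinates[2], coordinates[3]]]
--     for _ in range(7):
--         last = row[-1]
--         row.append([last[0] + 90, last[1], last[2] + 90, last[3]])
--     grid = []
--     for _ in range(8):
--         grid.extend(row)
--         row = [[b[0], b[1] + 90, b[2], b[3] + 90] for b in row]
--     return grid
-- ===== Notes on version B (the rewrite author's own statement) =====
-- stated objective: alternative
-- what changed: Instead of threading four running accumulators through a nested cell loop, B constructs the first row by repeatedly translating its last box 90px right, then builds the grid row by row by mapping a 90px-down translation over the whole previous row and extending the output.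
import Mathlib
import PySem

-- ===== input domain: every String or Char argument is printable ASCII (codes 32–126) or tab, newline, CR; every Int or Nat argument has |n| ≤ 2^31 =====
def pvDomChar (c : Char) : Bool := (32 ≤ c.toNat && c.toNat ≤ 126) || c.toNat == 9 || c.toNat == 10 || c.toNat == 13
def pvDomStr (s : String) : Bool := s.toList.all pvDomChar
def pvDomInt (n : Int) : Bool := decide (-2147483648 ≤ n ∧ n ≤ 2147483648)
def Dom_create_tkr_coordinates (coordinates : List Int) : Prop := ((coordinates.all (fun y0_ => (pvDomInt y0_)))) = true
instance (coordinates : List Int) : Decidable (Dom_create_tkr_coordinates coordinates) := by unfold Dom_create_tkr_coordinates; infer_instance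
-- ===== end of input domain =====

-- B builds the grid by geometric translation: the first row by translating the last box right, each further row by mapping a down-translation over the previous row; objective: alternative.
-- ===== PORT A =====
def create_tkr_coordinates (coordinates : List Int) : List (List Int) :=
  let y1 := (PySem.List.pyGet? coordinates 1).getD 0
  let y2 := (PySem.List.pyGet? coordinates 3).getD 0
  let outer := (PySem.List.pyRange 0 8 1).foldl
    (fun (st : List (List Int) × Int × Int) (_row : Int) =>
      let x1 := (PySem.List.pyGet? coordinates 0).getD 0
      let x2 := (PySem.List.pyGet? coordinates 2).getD 0
      let inner := (PySem.List.pyRange 0 8 1).foldl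
        (fun (s : List (List Int) × Int × Int) (_col : Int) =>
          (s.1 ++ [[s.2.1, st.2.1, s.2.2, st.2.2]], s.2.1 + 90, s.2.2 + 90))
        (st.1, x1, x2)
      (inner.1, st.2.1 + 90, st.2.2 + 90))
    (([] : List (List Int)), y1, y2)
  outer.1

-- ===== PORT B =====
def create_tkr_coordinates_alt (coordinates : List Int) : List (List Int) :=
  let row0 : List (List Int) :=
    [[(PySem.List.pyGet? coordinates 0).getD 0, (PySem.List.pyGet? coordinates 1).getD 0,
      (PySem.List.pyGet? coordinates 2).getD 0, (PySem.List.pyGet? coordinates 3).getD 0]]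
  let row := (PySem.List.pyRange 0 7 1).foldl
    (fun (row : List (List Int)) (_ : Int) =>
      let last := (PySem.List.pyGet? row (-1)).getD []
      row ++ [[(PySem.List.pyGet? last 0).getD 0 + 90, (PySem.List.pyGet? last 1).getD 0,
               (PySem.List.pyGet? last 2).getD 0 + 90, (PySem.List.pyGet? last 3).getD 0]])
    row0
  let result := (PySem.List.pyRange 0 8 1).foldl
    (fun (st : List (List Int) × List (List Int)) (_ : Int) =>
      (st.1 ++ st.2,
       st.2.map (fun b =>
         [(PySem.List.pyGet? b 0).getD 0, (PySem.List.pyGet? b 1).getD 0 + 90,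
          (PySem.List.pyGet? b 2).getD 0, (PySem.List.pyGet? b 3).getD 0 + 90])))
    (([] : List (List Int)), row)
  result.1

-- ===== PRECONDITION & SPEC =====
-- Pre_ excludes lists shorter than 4, on which A raises IndexError (B raises there too).
def Pre_create_tkr_coordinates (coordinates : List Int) : Prop := 4 ≤ coordinates.length
instance (coordinates : List Int) : Decidable (Pre_create_tkr_coordinates coordinates) := by unfold Pre_create_tkr_coordinates; infer_instance
def pvWitness_create_tkr_coordinates : List Int := [1, 2, 3, 4]
def Spec_create_tkr_coordinates (coordinates : List Int) (out : List (List Int)) : Prop := out = create_tkr_coordinates_alt coordinates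
instance (coordinates : List Int) (out : List (List Int)) : Decidable (Spec_create_tkr_coordinates coordinates out) := by unfold Spec_create_tkr_coordinates; infer_instance

-- ===== CLAIM (what is proved, stated in full; the proofs are below) =====
def Claim_equal_create_tkr_coordinates : Prop := ∀ (coordinates : List Int), Dom_create_tkr_coordinates coordinates → Pre_create_tkr_coordinates coordinates → Spec_create_tkr_coordinates coordinates (create_tkr_coordinates coordinates)

-- ===== LEMMAS AND PROOFS =====

-- ===== VERDICT (by name: the statement is the Claim_ definition above) =====
theorem create_tkr_coordinates_spec : Claim_equal_create_tkr_coordinates := by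
  intro coordinates _ hpre
  unfold Pre_create_tkr_coordinates at hpre
  obtain ⟨a, b, c, d, rest, rfl⟩ : ∃ a b c d rest, coordinates = a :: b :: c :: d :: rest := by
    match coordinates, hpre with
    | a :: b :: c :: d :: rest, _ => exact ⟨a, b, c, d, rest, rfl⟩
  unfold Spec_create_tkr_coordinates create_tkr_coordinates create_tkr_coordinates_alt
  simp [PySem.List.pyRange, PySem.List.pyGet?, PySem.List.pyIdx?, show Int.toNat 8 = 8 from rfl,
        show Int.toNat 7 = 7 from rfl, List.range_succ]
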